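-- pv_equiv track=rewrite | github.com/NbAiLab/nostram | utils/findinsertions.py | find_insertions
-- ===== SOURCE A (Python) =====
-- import string
--
-- def find_insertions(target, predictions, min_length=1, max_length=50):
--     target_words = target.lower().translate(str.maketrans('', '', string.punctuation)).split()
--     for prediction in predictions:
--         if prediction.lower().translate(str.maketrans('', '', string.punctuation)) == target.lower().translate(str.maketrans('', '', string.punctuation)):
--             return "", 0
--
--     best_length = 0
--     best_insertion = ""
--     for length in range(max_length, min_length - 1, -1):
--         for i in range(len(target_words) - length + 1):
--             ngram = ' '.join(target_words[i:i+length])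
--             if all(all(word not in prediction.lower().translate(str.maketrans('', '', string.punctuation)) for word in ngram.split()) for prediction in predictions):
--                 if length > best_length:
--                     best_length = length
--                     best_insertion = ngram
--     return best_insertion, best_length
-- ===== SOURCE B (Python) =====
-- import string
--
--
-- def _clean(s):
--     return s.lower().translate(str.maketrans('', '', string.punctuation))
--
--
-- def _runs(ins):
--     # run lengths of consecutive True starting at each position, right to left
--     if not ins:
--         return []
--     rest = _runs(ins[1:])
--     head = ((rest[0] if rest else 0) + 1) if ins[0] else 0
--     return [head] + rest
--
--
-- def find_insertions(target, predictions, min_length=1, max_length=50):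
--     tclean = _clean(target)
--     cleaned = [_clean(p) for p in predictions]
--     if tclean in cleaned:
--         return "", 0
--     words = tclean.split()
--     insertable = [all(w not in p for p in cleaned) for w in words]
--     runs = _runs(insertable)
--     best = min(max(runs, default=0), max_length)
--     if best < max(min_length, 1):
--         return "", 0
--     start = next(j for j, r in enumerate(runs) if r >= best)
--     return ' '.join(words[start:start + best]), best
-- ===== Notes on version B (the rewrite author's own statement) =====
-- stated objective: faster
-- what changed: B cleans the target and every prediction exactly once, computes a per-word insertability boolean list, and reads off the leftmost longest insertable run from right-to-left run lengths in one pass, instead of A's scan over every window length from max_length down with the punctuation table and cleaned predictions recomputed inside every window test.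
import Mathlib
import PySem

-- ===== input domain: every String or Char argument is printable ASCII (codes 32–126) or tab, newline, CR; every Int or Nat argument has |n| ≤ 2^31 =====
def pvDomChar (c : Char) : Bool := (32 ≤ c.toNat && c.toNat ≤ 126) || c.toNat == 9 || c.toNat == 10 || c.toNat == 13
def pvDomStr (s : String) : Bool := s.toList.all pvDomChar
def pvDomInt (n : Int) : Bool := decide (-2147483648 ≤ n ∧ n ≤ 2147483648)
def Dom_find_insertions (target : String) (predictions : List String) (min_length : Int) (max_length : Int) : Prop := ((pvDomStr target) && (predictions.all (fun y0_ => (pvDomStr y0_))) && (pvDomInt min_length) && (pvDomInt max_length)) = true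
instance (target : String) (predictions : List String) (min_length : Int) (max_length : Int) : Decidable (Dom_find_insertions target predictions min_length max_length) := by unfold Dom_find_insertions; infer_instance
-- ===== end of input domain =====

-- B precomputes the cleaned predictions and per-word insertability once, then finds the leftmost
-- longest insertable run in one pass instead of A's descending scan over every window length.


-- ===== PORT A =====
-- string.punctuation
def pvPunct : List Char := "!\"#$%&'()*+,-./:;<=>?@[\\]^_`{|}~".toList

-- s.lower().translate(str.maketrans('', '', string.punctuation))
def pvClean (s : String) : String :=
  String.ofList (((PySem.Str.lower s).toList).filter (fun c => !(pvPunct.contains c)))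

def find_insertions (target : String) (predictions : List String) (min_length : Int) (max_length : Int) : String × Int :=
  let target_words := PySem.Str.split₀ (pvClean target)
  if predictions.any (fun p => pvClean p == pvClean target) then ("", 0)
  else
    (PySem.List.pyRange max_length (min_length - 1) (-1)).foldl (fun (best : String × Int) L =>
      (PySem.List.pyRange 0 ((target_words.length : Int) - L + 1) 1).foldl (fun (best : String × Int) i =>
        let ngram := PySem.Str.join " " (PySem.List.slice target_words (some i) (some (i + L)))
        if (predictions.all fun p => (PySem.Str.split₀ ngram).all fun w => !(PySem.Str.isIn w (pvClean p)))
            && decide (best.2 < L)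
        then (ngram, L) else best) best) ("", 0)

-- ===== PORT B =====
-- _runs(ins): run length of consecutive True starting at each index, computed right to left
def pvRuns : List Bool → List Int
  | [] => []
  | b :: bs =>
    let rest := pvRuns bs
    (if b then rest.headD 0 + 1 else 0) :: rest

def find_insertions_alt (target : String) (predictions : List String) (min_length : Int) (max_length : Int) : String × Int :=
  let tclean := pvClean target
  let cleaned := predictions.map pvClean
  if cleaned.contains tclean then ("", 0)
  else
    let words := PySem.Str.split₀ tclean
    let insertable := words.map (fun w => cleaned.all (fun p => !(PySem.Str.isIn w p)))
    let runs := pvRuns insertable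
    let best := min (PySem.List.maxD runs (fun r => r) 0) max_length
    if best < max min_length 1 then ("", 0)
    else
      let start := runs.findIdx (fun r => best ≤ r)
      (PySem.Str.join " " (PySem.List.slice words (some (start : Int)) (some ((start : Int) + best))), best)

-- ===== PRECONDITION & SPEC =====
def Spec_find_insertions (target : String) (predictions : List String) (min_length : Int) (max_length : Int) (out : String × Int) : Prop := out = find_insertions_alt target predictions min_length max_length
instance (target : String) (predictions : List String) (min_length : Int) (max_length : Int) (out : String × Int) : Decidable (Spec_find_insertions target predictions min_length max_length out) := by unfold Spec_find_insertions; infer_instance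

-- ===== CLAIM (what is proved, stated in full; the proofs are below) =====
def Claim_equal_find_insertions : Prop := ∀ (target : String) (predictions : List String) (min_length : Int) (max_length : Int), Dom_find_insertions target predictions min_length max_length → Spec_find_insertions target predictions min_length max_length (find_insertions target predictions min_length max_length)

-- ===== LEMMAS AND PROOFS =====

-- words produced by split₀ are nonempty and whitespace-free
def pvGoodWord (w : List Char) : Prop := w ≠ [] ∧ ∀ c ∈ w, PySem.Chars.isspace c = false


theorem pv_go_word (w : List Char) (hw : ∀ c ∈ w, PySem.Chars.isspace c = false)
    (s cur : List Char) (acc : List (List Char)) :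
    PySem.Chars.split₀.go (w ++ s) cur acc = PySem.Chars.split₀.go s (w.reverse ++ cur) acc := by
  induction w generalizing cur with
  | nil => simp
  | cons c w ih =>
    have hc : PySem.Chars.isspace c = false := hw c (by simp)
    rw [List.cons_append, PySem.Chars.split₀.go, hc]
    simp only [Bool.false_eq_true, if_false]
    rw [ih (fun d hd => hw d (by simp [hd])) (c :: cur)]
    simp

theorem pv_go_space (c : Char) (hc : PySem.Chars.isspace c = true) (s cur : List Char) (acc : List (List Char)) :
    PySem.Chars.split₀.go (c :: s) cur acc
      = if cur.isEmpty then PySem.Chars.split₀.go s [] acc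
        else PySem.Chars.split₀.go s [] (cur.reverse :: acc) := by
  rw [PySem.Chars.split₀.go, hc]; simp

theorem pv_split_join_go : ∀ (ws : List (List Char)), (∀ w ∈ ws, pvGoodWord w) →
    ∀ acc, PySem.Chars.split₀.go (PySem.Chars.join [' '] ws) [] acc = acc.reverse ++ ws := by
  intro ws
  induction ws with
  | nil =>
    intro _ acc
    rw [PySem.Chars.join_nil, PySem.Chars.split₀.go]
    simp
  | cons w tail ih =>
    intro h acc
    have hw : pvGoodWord w := h w (by simp)
    cases tail with
    | nil =>
      rw [PySem.Chars.join_singleton, show w = w ++ [] from by simp,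
        pv_go_word w hw.2 [] [] acc, PySem.Chars.split₀.go]
      simp [hw.1]
    | cons w' tail' =>
      rw [PySem.Chars.join_cons_cons, List.append_assoc, pv_go_word w hw.2,
        List.singleton_append, pv_go_space ' ' (by decide)]
      simp only [List.append_nil]
      rw [if_neg (by simp [hw.1])]
      rw [show w.reverse.reverse = w from by simp]
      rw [ih (fun u hu => h u (by simp [hu])) (w :: acc)]
      simp

theorem pv_split_join (ws : List (List Char)) (h : ∀ w ∈ ws, pvGoodWord w) :
    PySem.Chars.split₀ (PySem.Chars.join [' '] ws) = ws := by
  rw [PySem.Chars.split₀, pv_split_join_go ws h []]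
  simp

theorem pv_go_good : ∀ (s cur : List Char) (acc : List (List Char)),
    (∀ w ∈ acc, pvGoodWord w) → (∀ c ∈ cur, PySem.Chars.isspace c = false) →
    ∀ w ∈ PySem.Chars.split₀.go s cur acc, pvGoodWord w := by
  intro s
  induction s with
  | nil =>
    intro cur acc hacc hcur w hw
    rw [PySem.Chars.split₀.go] at hw
    by_cases hc : cur.isEmpty
    · rw [if_pos hc] at hw
      exact hacc w (by simpa using hw)
    · rw [if_neg hc] at hw
      simp at hw
      rcases hw with hw | hw
      · exact hacc w hw
      · exact hw ▸ ⟨by simpa [List.isEmpty_iff] using hc, fun c hcm => hcur c (by simpa using hcm)⟩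
  | cons c s ih =>
    intro cur acc hacc hcur w hw
    rw [PySem.Chars.split₀.go] at hw
    by_cases hc : PySem.Chars.isspace c
    · rw [if_pos hc] at hw
      by_cases hcc : cur.isEmpty
      · rw [if_pos hcc] at hw
        exact ih [] acc hacc (by simp) w hw
      · rw [if_neg hcc] at hw
        refine ih [] _ ?_ (by simp) w hw
        intro u hu
        rcases List.mem_cons.mp hu with h1 | h1
        · exact h1 ▸ ⟨by simpa [List.isEmpty_iff] using hcc, fun d hd => hcur d (by simpa using hd)⟩
        · exact hacc u h1
    · rw [if_neg hc] at hw
      refine ih (c :: cur) acc hacc ?_ w hw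
      intro d hd
      rcases List.mem_cons.mp hd with h1 | h1
      · exact h1 ▸ (by simpa using hc)
      · exact hcur d h1

theorem pv_split₀_good (s : List Char) : ∀ w ∈ PySem.Chars.split₀ s, pvGoodWord w :=
  pv_go_good s [] [] (by simp) (by simp)

theorem pv_str_split_join (ws : List String) (h : ∀ w ∈ ws, pvGoodWord w.toList) :
    PySem.Str.split₀ (PySem.Str.join " " ws) = ws := by
  have : List.map String.toList (PySem.Str.split₀ (PySem.Str.join " " ws)) = List.map String.toList ws := by
    rw [PySem.Str.split₀_map_toList, PySem.Str.toList_join]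
    exact pv_split_join (ws.map String.toList) (by simpa using fun w hw => h w hw)
  exact List.map_injective_iff.mpr (fun a b hab => String.toList_inj.mp hab) this

-- leading-run length and its relation to pvRuns
def pvRunLen : List Bool → Int
  | [] => 0
  | b :: bs => if b then pvRunLen bs + 1 else 0

theorem pvRuns_length (bs : List Bool) : (pvRuns bs).length = bs.length := by
  induction bs with
  | nil => rfl
  | cons b bs ih => simp [pvRuns, ih]

theorem pvRuns_headD (bs : List Bool) : (pvRuns bs).headD 0 = pvRunLen bs := by
  cases bs with
  | nil => rfl
  | cons b bs => rw [pvRuns, pvRunLen]; simp [← pvRuns_headD bs, List.headD_eq_head?_getD]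

theorem pvRuns_getElem (bs : List Bool) (j : Nat) (h : j < (pvRuns bs).length) :
    (pvRuns bs)[j] = pvRunLen (bs.drop j) := by
  induction bs generalizing j with
  | nil => simp [pvRuns] at h
  | cons b bs ih =>
    cases j with
    | zero =>
      simp [pvRuns, pvRunLen, ← pvRuns_headD bs, List.headD_eq_head?_getD]
    | succ j => simpa [pvRuns] using ih j (by simpa [pvRuns, pvRuns_length] using h)

theorem pvRunLen_nonneg (bs : List Bool) : 0 ≤ pvRunLen bs := by
  induction bs with
  | nil => simp [pvRunLen]
  | cons b bs ih => by_cases hb : b <;> simp [pvRunLen, hb] <;> omega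

theorem pvRunLen_le (bs : List Bool) : pvRunLen bs ≤ bs.length := by
  induction bs with
  | nil => simp [pvRunLen]
  | cons b bs ih => by_cases hb : b <;> simp [pvRunLen, hb] <;> omega

theorem pvRunLen_ge_iff (bs : List Bool) (L : Nat) :
    (L : Int) ≤ pvRunLen bs ↔ L ≤ bs.length ∧ (bs.take L).all id = true := by
  induction bs generalizing L with
  | nil =>
    cases L <;> simp [pvRunLen]
  | cons b bs ih =>
    cases L with
    | zero => simpa [pvRunLen] using pvRunLen_nonneg (b :: bs)
    | succ L =>
      by_cases hb : b
      · rw [show pvRunLen (b :: bs) = pvRunLen bs + 1 by simp [pvRunLen, hb],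
          show ((L + 1 : Nat) : Int) ≤ pvRunLen bs + 1 ↔ (L : Int) ≤ pvRunLen bs by push_cast; omega,
          ih L]
        simp [List.take_succ_cons, hb]
        try omega
      · have hbf : b = false := by simpa using hb
        subst hbf
        simp [pvRunLen, List.take_succ_cons]
        try omega

-- fold that never updates
theorem pv_foldl_const {α β : Type} (l : List α) (f : β → α → β) (s : β)
    (h : ∀ x ∈ l, f s x = s) : l.foldl f s = s := by
  induction l with
  | nil => rfl
  | cons x l ih => rw [List.foldl_cons, h x (by simp)]; exact ih (fun y hy => h y (by simp [hy]))

-- countdown range split at a midpoint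
theorem pv_pyRange_neg_one_append (a m b : Int) (h1 : b ≤ m) (h2 : m ≤ a) :
    PySem.List.pyRange a b (-1) = PySem.List.pyRange a m (-1) ++ PySem.List.pyRange m b (-1) := by
  rw [PySem.List.pyRange_neg_one_eq_reverse, PySem.List.pyRange_neg_one_eq_reverse,
    PySem.List.pyRange_neg_one_eq_reverse,
    PySem.List.pyRange_one_append (b + 1) (m + 1) (a + 1) (by omega) (by omega)]
  simp


-- A window of ngram-words maps to a window of booleans
theorem pv_slice_map {α β : Type} (f : α → β) (xs : List α) (a? b? : Option Int) :
    PySem.List.slice (xs.map f) a? b? = (PySem.List.slice xs a? b?).map f := by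
  simp [PySem.List.slice, List.map_drop, List.map_take]

theorem pv_all_swap {α β : Type} (l : List α) (m : List β) (f : α → β → Bool) :
    (l.all fun a => m.all fun b => f a b) = (m.all fun b => l.all fun a => f a b) := by
  rw [Bool.eq_iff_iff]
  simp only [List.all_eq_true]
  exact ⟨fun h b hb a ha => h a ha b hb, fun h a ha b hb => h b hb a ha⟩

-- the two early-exit guards compute the same Bool
theorem pv_early (target : String) (predictions : List String) :
    (predictions.any fun p => pvClean p == pvClean target)
      = (predictions.map pvClean).contains (pvClean target) := by
  rw [Bool.eq_iff_iff]; simp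

theorem pv_str_split₀_good (s : String) :
    ∀ w ∈ PySem.Str.split₀ s, pvGoodWord w.toList := by
  intro w hw
  exact pv_split₀_good s.toList w.toList
    (by rw [← PySem.Str.split₀_map_toList]; exact List.mem_map_of_mem hw)

-- window characterisation: a fully-insertable window of length L starts at i iff runs[i] ≥ L
theorem pv_window_iff (bs : List Bool) (i L : Int) (hi : 0 ≤ i) (hL : 1 ≤ L)
    (hiL : i + L ≤ (bs.length : Int)) :
    ((PySem.List.slice bs (some i) (some (i + L))).all id = true)
      ↔ L ≤ (pvRuns bs)[i.toNat]'(by rw [pvRuns_length]; omega) := by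
  rw [PySem.List.slice_toNat _ hi (by omega), pvRuns_getElem _ _ (by rw [pvRuns_length]; omega),
    show (i + L).toNat - i.toNat = L.toNat from by omega]
  have hlen : L.toNat ≤ (bs.drop i.toNat).length := by simp; omega
  have h2 := pvRunLen_ge_iff (bs.drop i.toNat) L.toNat
  constructor
  · intro h
    have := h2.mpr ⟨hlen, h⟩
    omega
  · intro h
    exact (h2.mp (by omega)).2

-- the heart: A's descending double scan equals the run-based answer
theorem pv_fold_main (bs : List Bool) (ngram : Int → Int → String) (mn mx : Int) :
    ((PySem.List.pyRange mx (mn - 1) (-1)).foldl (fun (best : String × Int) L =>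
        (PySem.List.pyRange 0 ((bs.length : Int) - L + 1) 1).foldl (fun best i =>
          if (PySem.List.slice bs (some i) (some (i + L))).all id && decide (best.2 < L)
          then (ngram i L, L) else best) best) ("", 0))
      = (if min (PySem.List.maxD (pvRuns bs) (fun r => r) 0) mx < max mn 1 then ("", 0)
         else (ngram ((pvRuns bs).findIdx (fun r => min (PySem.List.maxD (pvRuns bs) (fun r => r) 0) mx ≤ r) : Int)
                 (min (PySem.List.maxD (pvRuns bs) (fun r => r) 0) mx),
               min (PySem.List.maxD (pvRuns bs) (fun r => r) 0) mx)) := by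
  set runs := pvRuns bs with hruns
  set maxR := PySem.List.maxD runs (fun r => r) 0 with hmaxR
  set M := min maxR mx with hM
  have hrl : runs.length = bs.length := pvRuns_length bs
  have hub : ∀ r ∈ runs, r ≤ maxR := by
    intro r hr
    have hne : runs ≠ [] := fun h => by simp [h] at hr
    exact PySem.List.max?_isMax (PySem.List.max?_eq_some_maxD runs (fun r => r) 0 hne) r hr
  -- any true window of positive length L bounds L by maxR
  have hwin : ∀ i L : Int, 0 ≤ i → 1 ≤ L → i + L ≤ (bs.length : Int) →
      (PySem.List.slice bs (some i) (some (i + L))).all id = true → L ≤ maxR := by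
    intro i L hi hL hiL hall
    have h1 := (pv_window_iff bs i L hi hL hiL).mp hall
    exact le_trans h1 (hub _ (by exact List.getElem_mem _))
  have hMa : M ≤ maxR := min_le_left _ _
  have hMb : M ≤ mx := min_le_right _ _
  have hMc : M = maxR ∨ M = mx := min_choice maxR mx
  by_cases hcase : M < max mn 1
  · rw [if_pos hcase]
    apply pv_foldl_const
    intro L hL
    have hLr := PySem.List.mem_pyRange_neg_one.mp hL
    apply pv_foldl_const
    intro i hi
    have hir := PySem.List.mem_pyRange_one.mp hi
    rw [if_neg]
    intro hcond
    rw [Bool.and_eq_true] at hcond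
    have hLpos : (0 : Int) < L := by simpa using of_decide_eq_true hcond.2
    have := hwin i L (by omega) (by omega) (by omega) hcond.1
    rcases hMc with h | h <;> omega
  · rw [if_neg hcase]
    have hM1 : 1 ≤ M := by omega
    have hMmx : M ≤ mx := by omega
    have hMmaxR : M ≤ maxR := by simp [hM]
    have hrne : runs ≠ [] := by
      intro h
      rw [h] at hmaxR
      simp [PySem.List.maxD_nil] at hmaxR
      omega
    set j := runs.findIdx (fun r => M ≤ r) with hj
    have hjlt : j < runs.length := by
      apply List.findIdx_lt_length.mpr
      exact ⟨maxR, PySem.List.maxD_mem runs (fun r => r) 0 hrne, by simpa using hMmaxR⟩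
    have hjge : M ≤ runs[j] := by simpa using (List.findIdx_getElem (w := hjlt))
    have hjmin : ∀ k (hk : k < j), ¬ M ≤ runs[k]'(by omega) := by
      intro k hk
      simpa using List.not_of_lt_findIdx (p := fun r => decide (M ≤ r)) (xs := runs) hk
    have hjn : (j : Int) + M ≤ (bs.length : Int) := by
      have h1 : runs[j] = pvRunLen (bs.drop j) := pvRuns_getElem _ _ hjlt
      have h2 := pvRunLen_le (bs.drop j)
      simp at h2
      omega
    -- split the outer countdown at M
    rw [pv_pyRange_neg_one_append mx M (mn - 1) (by omega) (by omega), List.foldl_append]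
    -- segment mx..M+1 : no window of length L > M exists
    rw [pv_foldl_const (PySem.List.pyRange mx M (-1)) _ (("", 0) : String × Int) (by
      intro L hL
      have hLr := PySem.List.mem_pyRange_neg_one.mp hL
      apply pv_foldl_const
      intro i hi
      have hir := PySem.List.mem_pyRange_one.mp hi
      rw [if_neg]
      intro hcond
      rw [Bool.and_eq_true] at hcond
      have := hwin i L (by omega) (by omega) (by omega) hcond.1
      rcases hMc with h | h <;> omega)]
    -- now the first length considered is M itself
    rw [PySem.List.pyRange_neg_one_cons (by omega : mn - 1 < M), List.foldl_cons]
    -- inner scan at length M : split at j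
    rw [PySem.List.pyRange_one_append 0 (j : Int) ((bs.length : Int) - M + 1) (by omega) (by omega),
      List.foldl_append]
    -- indices before j : no window starts there
    rw [pv_foldl_const (PySem.List.pyRange 0 (j : Int) 1) _ (("", 0) : String × Int) (by
      intro i hi
      have hir := PySem.List.mem_pyRange_one.mp hi
      rw [if_neg]
      intro hcond
      rw [Bool.and_eq_true] at hcond
      have h1 := (pv_window_iff bs i M (by omega) (by omega) (by omega)).mp hcond.1
      exact hjmin i.toNat (by omega) h1)]
    -- at index j the window exists and the state is updated
    rw [PySem.List.pyRange_one_cons (by omega : (j : Int) < (bs.length : Int) - M + 1), List.foldl_cons]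
    rw [if_pos (by
      rw [Bool.and_eq_true]
      refine ⟨?_, by simp; omega⟩
      apply (pv_window_iff bs (j : Int) M (by omega) (by omega) (by omega)).mpr
      simpa using hjge)]
    -- the rest of the inner scan cannot improve on length M
    rw [pv_foldl_const (PySem.List.pyRange ((j : Int) + 1) ((bs.length : Int) - M + 1) 1) _
        ((ngram (j : Int) M, M) : String × Int) (by
      intro i hi
      rw [if_neg]
      intro hcond
      rw [Bool.and_eq_true] at hcond
      have := of_decide_eq_true hcond.2
      simp at this)]
    -- the remaining lengths M-1 .. mn are all smaller than the stored best
    rw [pv_foldl_const (PySem.List.pyRange (M - 1) (mn - 1) (-1)) _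
        ((ngram (j : Int) M, M) : String × Int) (by
      intro L hL
      have hLr := PySem.List.mem_pyRange_neg_one.mp hL
      apply pv_foldl_const
      intro i hi
      rw [if_neg]
      intro hcond
      rw [Bool.and_eq_true] at hcond
      have := of_decide_eq_true hcond.2
      omega)]

-- rewrite A's per-window test into the boolean-window test
theorem pv_A_fold_eq (predictions : List String) (ws : List String) (mn mx : Int)
    (hgood : ∀ w ∈ ws, pvGoodWord w.toList) :
    ((PySem.List.pyRange mx (mn - 1) (-1)).foldl (fun (best : String × Int) L =>
        (PySem.List.pyRange 0 (((ws.map (fun w => (predictions.map pvClean).all fun p => !(PySem.Str.isIn w p))).length : Int) - L + 1) 1).foldl (fun best i =>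
          if (predictions.all fun p => (PySem.Str.split₀ (PySem.Str.join " " (PySem.List.slice ws (some i) (some (i + L))))).all fun w => !(PySem.Str.isIn w (pvClean p)))
              && decide (best.2 < L)
          then (PySem.Str.join " " (PySem.List.slice ws (some i) (some (i + L))), L) else best) best) ("", 0))
      = ((PySem.List.pyRange mx (mn - 1) (-1)).foldl (fun (best : String × Int) L =>
        (PySem.List.pyRange 0 (((ws.map (fun w => (predictions.map pvClean).all fun p => !(PySem.Str.isIn w p))).length : Int) - L + 1) 1).foldl (fun best i =>
          if (PySem.List.slice (ws.map (fun w => (predictions.map pvClean).all fun p => !(PySem.Str.isIn w p))) (some i) (some (i + L))).all id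
              && decide (best.2 < L)
          then (PySem.Str.join " " (PySem.List.slice ws (some i) (some (i + L))), L) else best) best) ("", 0)) := by
  apply PySem.List.foldl_congr_mem
  intro acc L _
  apply PySem.List.foldl_congr_mem
  intro acc2 i _
  have hC : (predictions.all fun p => (PySem.Str.split₀ (PySem.Str.join " " (PySem.List.slice ws (some i) (some (i + L))))).all fun w => !(PySem.Str.isIn w (pvClean p)))
      = (PySem.List.slice (ws.map (fun w => (predictions.map pvClean).all fun p => !(PySem.Str.isIn w p))) (some i) (some (i + L))).all id := by
    rw [pv_str_split_join _ (fun w hw => hgood w (PySem.List.mem_of_mem_slice _ _ _ hw)),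
      pv_all_swap, pv_slice_map]
    simp [List.all_map, Function.comp_def]
  rw [hC]

theorem find_insertions_spec' (target : String) (predictions : List String)
    (min_length max_length : Int) :
    find_insertions target predictions min_length max_length
      = find_insertions_alt target predictions min_length max_length := by
  simp only [find_insertions, find_insertions_alt]
  rw [pv_early]
  by_cases h : ((predictions.map pvClean).contains (pvClean target)) = true
  · rw [if_pos h, if_pos h]
  · rw [if_neg h, if_neg h]
    rw [← show ((((PySem.Str.split₀ (pvClean target)).map (fun w => (predictions.map pvClean).all fun p => !(PySem.Str.isIn w p))).length : Int)) = (((PySem.Str.split₀ (pvClean target)).length : Int)) from by rw [List.length_map]]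
    rw [pv_A_fold_eq predictions (PySem.Str.split₀ (pvClean target)) min_length max_length (pv_str_split₀_good _)]
    exact pv_fold_main ((PySem.Str.split₀ (pvClean target)).map (fun w => (predictions.map pvClean).all fun p => !(PySem.Str.isIn w p)))
      (fun i L => PySem.Str.join " " (PySem.List.slice (PySem.Str.split₀ (pvClean target)) (some i) (some (i + L))))
      min_length max_length

-- ===== VERDICT (by name: the statement is the Claim_ definition above) =====
theorem find_insertions_spec : Claim_equal_find_insertions := by
  intro target predictions min_length max_length _
  exact find_insertions_spec' target predictions min_length max_length
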